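-- pv_equiv track=rewrite | github.com/junbum000921/algorithm | py/who_is_winnner.py | process_contest
-- ===== SOURCE A (Python) =====
-- def process_contest(M, N, P, submissions):
--     participants = {i: {'solved': 0, 'score': 0, 'problems': {}} for i in range(1, P+1)}
--
--     for p, m, t, j in submissions:
--         if m not in participants[p]['problems']:
--             participants[p]['problems'][m] = {'wrong_attempts': 0, 'solved_time': None}
--
--         problem_data = participants[p]['problems'][m]
--
--         if j == 1 and problem_data['solved_time'] is None:
--             problem_data['solved_time'] = t
--             participants[p]['solved'] += 1
--             participants[p]['score'] += t + problem_data['wrong_attempts'] * 20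
--         elif j == 0 and problem_data['solved_time'] is None:
--             problem_data['wrong_attempts'] += 1
--
--     ranking = sorted(
--         [(pid, data['solved'], data['score']) for pid, data in participants.items()],
--         key=lambda x: (-x[1], x[2])
--     )
--
--     return ranking
-- ===== SOURCE B (Python) =====
-- def _contrib(subs):
--     # score contribution of one (participant, problem) group, or None if never solved
--     seen = []
--     for t, j in subs:
--         if j == 1:
--             return t + 20 * sum(1 for _, jj in seen if jj == 0)
--         seen.append((t, j))
--     return None
--
--
-- def _stats(subs):
--     # (solved, score) for one participant's submission list [(m, t, j), ...]
--     groups = {}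
--     for m, t, j in subs:
--         groups.setdefault(m, []).append((t, j))
--     solved = 0
--     score = 0
--     for g in groups.values():
--         c = _contrib(g)
--         if c is not None:
--             solved += 1
--             score += c
--     return solved, score
--
--
-- def process_contest(M, N, P, submissions):
--     by_part = {pid: [] for pid in range(1, P + 1)}
--     for p, m, t, j in submissions:
--         by_part[p].append((m, t, j))
--     ranking = [(pid,) + _stats(by_part[pid]) for pid in range(1, P + 1)]
--     return sorted(ranking, key=lambda x: (-x[1], x[2]))
-- ===== Notes on version B (the rewrite author's own statement) =====
-- stated objective: alternative
-- what changed: A makes one pass over submissions mutating a nested per-participant/per-problem state dict with incremental wrong-attempt counters; B instead groups submissions by participant and then by problem, and scores each group independently by finding the first accepted submission and counting the j==0 entries in the prefix before it.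
import Mathlib
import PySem

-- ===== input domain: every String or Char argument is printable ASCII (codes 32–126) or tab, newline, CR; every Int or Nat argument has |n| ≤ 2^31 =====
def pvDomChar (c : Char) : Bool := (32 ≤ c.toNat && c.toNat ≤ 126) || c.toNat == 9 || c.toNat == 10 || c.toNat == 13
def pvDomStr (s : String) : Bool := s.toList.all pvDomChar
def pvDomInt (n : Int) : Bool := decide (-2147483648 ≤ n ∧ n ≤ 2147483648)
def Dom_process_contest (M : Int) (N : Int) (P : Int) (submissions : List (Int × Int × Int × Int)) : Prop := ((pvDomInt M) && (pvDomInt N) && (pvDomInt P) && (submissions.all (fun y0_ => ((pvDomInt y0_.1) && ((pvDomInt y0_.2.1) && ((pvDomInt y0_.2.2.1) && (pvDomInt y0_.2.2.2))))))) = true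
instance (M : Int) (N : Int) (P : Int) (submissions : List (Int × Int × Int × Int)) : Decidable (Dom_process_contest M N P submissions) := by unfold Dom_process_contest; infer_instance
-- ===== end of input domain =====

-- B re-decomposes A's single stateful pass as group-by-(participant,problem) then a
-- prefix-count score per group ('alternative' objective, same asymptotic cost).

-- ===== PORT A =====
-- per-submission update of one participant's record (solved, score, problems dict);
-- mutation of participants[p] / problem_data in place is ported by writing the tuple back
def pcInner (part : Int × Int × PySem.Dict Int (Int × Option Int)) (m t j : Int) :
    Int × Int × PySem.Dict Int (Int × Option Int) :=
  let probs := if part.2.2.contains m then part.2.2 else part.2.2.insert m (0, none)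
  let pd := probs.getD m (0, none)
  if j = 1 ∧ pd.2 = none then
    (part.1 + 1, part.2.1 + (t + pd.1 * 20), probs.insert m (pd.1, some t))
  else if j = 0 ∧ pd.2 = none then
    (part.1, part.2.1, probs.insert m (pd.1 + 1, pd.2))
  else
    (part.1, part.2.1, probs)

def process_contest (M : Int) (N : Int) (P : Int) (submissions : List (Int × Int × Int × Int)) : List (Int × Int × Int) :=
  let participants0 : PySem.Dict Int (Int × Int × PySem.Dict Int (Int × Option Int)) :=
    (PySem.List.pyRange 1 (P + 1) 1).foldl
      (fun d i => d.insert i ((0 : Int), (0 : Int), PySem.Dict.empty)) PySem.Dict.empty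
  -- participants[p] accesses are KeyError for p outside 1..P (excluded by Pre_);
  -- getD's default is never used on Pre_ inputs
  let fin := submissions.foldl
    (fun d s => d.insert s.1 (pcInner (d.getD s.1 (0, 0, PySem.Dict.empty)) s.2.1 s.2.2.1 s.2.2.2))
    participants0
  PySem.List.sorted2 (fin.items.map (fun pd => (pd.1, pd.2.1, pd.2.2.1)))
    (fun x => -x.2.1) (fun x => x.2.2)

-- ===== PORT B =====
-- _contrib: 'seen' is subs[:k]; sum(1 for _, jj in seen if jj == 0) is the filter length
def bContrib (seen : List (Int × Int)) : List (Int × Int) → Option Int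
  | [] => none
  | x :: rest =>
    if x.2 = 1 then some (x.1 + 20 * ((seen.filter (fun y => y.2 = 0)).length : Int))
    else bContrib (seen ++ [x]) rest

-- _stats: groups.setdefault(m, []).append((t, j)) is d[m] = d.get(m, []) + [(t, j)]
def bStats (subs : List (Int × Int × Int)) : Int × Int :=
  let groups : PySem.Dict Int (List (Int × Int)) :=
    subs.foldl (fun g x => g.modify x.1 [] (· ++ [x.2])) PySem.Dict.empty
  groups.values.foldl
    (fun cs g => match bContrib [] g with
      | some c => (cs.1 + 1, cs.2 + c)
      | none => cs)
    ((0 : Int), (0 : Int))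

def process_contest_alt (M : Int) (N : Int) (P : Int) (submissions : List (Int × Int × Int × Int)) : List (Int × Int × Int) :=
  -- by_part[p].append: KeyError for p outside 1..P (excluded by Pre_), ported as modify
  let byPart : PySem.Dict Int (List (Int × Int × Int)) :=
    submissions.foldl (fun d s => d.modify s.1 [] (· ++ [s.2]))
      ((PySem.List.pyRange 1 (P + 1) 1).foldl
        (fun d i => d.insert i ([] : List (Int × Int × Int))) PySem.Dict.empty)
  let ranking := (PySem.List.pyRange 1 (P + 1) 1).map (fun pid =>
    let st := bStats (byPart.getD pid [])
    (pid, st.1, st.2))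
  PySem.List.sorted2 ranking (fun x => -x.2.1) (fun x => x.2.2)

-- ===== PRECONDITION & SPEC =====
-- Pre_ excludes exactly the inputs where A raises KeyError: a submission whose
-- participant id is outside 1..P.
def Pre_process_contest (M : Int) (N : Int) (P : Int) (submissions : List (Int × Int × Int × Int)) : Prop :=
  ∀ s ∈ submissions, 1 ≤ s.1 ∧ s.1 ≤ P
instance (M : Int) (N : Int) (P : Int) (submissions : List (Int × Int × Int × Int)) : Decidable (Pre_process_contest M N P submissions) := by unfold Pre_process_contest; infer_instance

def pvWitness_process_contest : Int × Int × Int × (List (Int × Int × Int × Int)) :=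
  (2, 2, 2, [(1, 1, 10, 0), (1, 1, 20, 1), (2, 2, 5, 1)])

def Spec_process_contest (M : Int) (N : Int) (P : Int) (submissions : List (Int × Int × Int × Int)) (out : List (Int × Int × Int)) : Prop := out = process_contest_alt M N P submissions
instance (M : Int) (N : Int) (P : Int) (submissions : List (Int × Int × Int × Int)) (out : List (Int × Int × Int)) : Decidable (Spec_process_contest M N P submissions out) := by unfold Spec_process_contest; infer_instance

-- ===== CLAIM (what is proved, stated in full; the proofs are below) =====
def Claim_equal_process_contest : Prop := ∀ (M : Int) (N : Int) (P : Int) (submissions : List (Int × Int × Int × Int)), Dom_process_contest M N P submissions → Pre_process_contest M N P submissions → Spec_process_contest M N P submissions (process_contest M N P submissions)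

-- ===== LEMMAS AND PROOFS =====

-- semantic layer: per-(participant,problem) state machine and per-participant sums
def pairStep (ws : Int × Option Int) (x : Int × Int) : Int × Option Int :=
  if x.2 = 1 ∧ ws.2 = none then (ws.1, some x.1)
  else if x.2 = 0 ∧ ws.2 = none then (ws.1 + 1, ws.2)
  else ws

def pairP (g : List (Int × Int)) : Int × Option Int := g.foldl pairStep (0, none)

def grp (L : List (Int × Int × Int)) (m : Int) : List (Int × Int) :=
  (L.filter (fun x => x.1 == m)).map (·.2)

def indOf (ws : Int × Option Int) : Int := if ws.2.isSome then 1 else 0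

def scOf (ws : Int × Option Int) : Int :=
  match ws.2 with
  | some t => t + ws.1 * 20
  | none => 0

def cnt (L : List (Int × Int × Int)) : Int :=
  ((PySem.Set.ofList (L.map (·.1))).map (fun m => indOf (pairP (grp L m)))).sum

def sc (L : List (Int × Int × Int)) : Int :=
  ((PySem.Set.ofList (L.map (·.1))).map (fun m => scOf (pairP (grp L m)))).sum

def perPid (L : List (Int × Int × Int)) (p0 : Int × Int × PySem.Dict Int (Int × Option Int)) :
    Int × Int × PySem.Dict Int (Int × Option Int) :=
  L.foldl (fun part x => pcInner part x.1 x.2.1 x.2.2) p0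

-- generic list/set helpers
theorem set_add_mem {s : List Int} {x : Int} (h : x ∈ s) : PySem.Set.add s x = s := by
  simp [PySem.Set.add, PySem.Set.contains, h]

theorem set_add_not_mem {s : List Int} {x : Int} (h : x ∉ s) : PySem.Set.add s x = s ++ [x] := by
  simp [PySem.Set.add, PySem.Set.contains, h]

theorem set_update_subset (l : List Int) : ∀ s : List Int, (∀ x ∈ l, x ∈ s) → PySem.Set.update s l = s := by
  induction l with
  | nil => intro s _; rfl
  | cons x l ih =>
    intro s h
    have : PySem.Set.update s (x :: l) = PySem.Set.update (PySem.Set.add s x) l := rfl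
    rw [this, set_add_mem (h x (by simp))]
    exact ih s (fun y hy => h y (by simp [hy]))

theorem set_foldl_add_eq_append (l : List Int) : ∀ s : List Int, l.Nodup → (∀ x ∈ l, x ∉ s) →
    l.foldl PySem.Set.add s = s ++ l := by
  induction l with
  | nil => intro s _ _; simp
  | cons x l ih =>
    intro s hnd hdisj
    have h1 : l.foldl PySem.Set.add (PySem.Set.add s x) = (s ++ [x]) ++ l := by
      rw [set_add_not_mem (hdisj x (by simp))]
      exact ih (s ++ [x]) hnd.of_cons (by
        intro y hy
        simp only [List.mem_append, List.mem_singleton]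
        rintro (h | rfl)
        · exact hdisj y (by simp [hy]) h
        · exact (List.nodup_cons.mp hnd).1 hy)
    simpa [List.foldl_cons] using h1

theorem set_ofList_nodup (l : List Int) (h : l.Nodup) : PySem.Set.ofList l = l := by
  have := set_foldl_add_eq_append l [] h (by simp)
  simpa [PySem.Set.ofList_eq_foldl] using this

theorem set_ofList_append_singleton_mem {l : List Int} {x : Int} (h : x ∈ l) :
    PySem.Set.ofList (l ++ [x]) = PySem.Set.ofList l := by
  rw [PySem.Set.ofList_eq_foldl, PySem.Set.ofList_eq_foldl, List.foldl_append]
  simp only [List.foldl_cons, List.foldl_nil]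
  exact set_add_mem (by rw [← PySem.Set.ofList_eq_foldl]; exact (PySem.Set.mem_ofList l x).mpr h)

theorem set_ofList_append_singleton_not_mem {l : List Int} {x : Int} (h : x ∉ l) :
    PySem.Set.ofList (l ++ [x]) = PySem.Set.ofList l ++ [x] := by
  rw [PySem.Set.ofList_eq_foldl, PySem.Set.ofList_eq_foldl, List.foldl_append]
  simp only [List.foldl_cons, List.foldl_nil]
  exact set_add_not_mem (fun hc => h ((PySem.Set.mem_ofList l x).mp
    (by rw [PySem.Set.ofList_eq_foldl]; exact hc)))

-- a sum over a Nodup list where the summand changes at one element only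
theorem sum_map_congr_single {l : List Int} {m0 : Int} (f g : Int → Int)
    (hnd : l.Nodup) (hm : m0 ∈ l) (hoff : ∀ y ∈ l, y ≠ m0 → f y = g y) :
    (l.map g).sum = (l.map f).sum + (g m0 - f m0) := by
  induction l with
  | nil => cases hm
  | cons a l ih =>
    rcases List.mem_cons.mp hm with rfl | hm'
    · have hrest : ∀ y ∈ l, f y = g y := fun y hy =>
        hoff y (by simp [hy]) (fun hEq => (List.nodup_cons.mp hnd).1 (hEq ▸ hy))
      have : l.map g = l.map f := by
        apply List.map_congr_left; intro y hy; exact (hrest y hy).symm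
      simp [this]; ring
    · have ha : f a = g a := hoff a (by simp)
        (fun hEq => (List.nodup_cons.mp hnd).1 (hEq ▸ hm'))
      have := ih (List.nodup_cons.mp hnd).2 hm' (fun y hy hne => hoff y (by simp [hy]) hne)
      simp [this, ha]; ring

theorem pairP_stuck (g : List (Int × Int)) : ∀ w t, g.foldl pairStep (w, some t) = (w, some t) := by
  induction g with
  | nil => intro w t; rfl
  | cons x g ih =>
    intro w t
    simp only [List.foldl_cons, pairStep]
    simp [ih]

-- A's fold is pointwise (per participant id) a fold of pcInner over that id's submissions
theorem a_fold_pointwise (L : List (Int × Int × Int × Int)) :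
    ∀ (D : PySem.Dict Int (Int × Int × PySem.Dict Int (Int × Option Int))) (q : Int),
    (L.foldl (fun d s => d.insert s.1 (pcInner (d.getD s.1 (0, 0, PySem.Dict.empty)) s.2.1 s.2.2.1 s.2.2.2)) D).getD q (0, 0, PySem.Dict.empty)
      = perPid ((L.filter (fun s => s.1 == q)).map (·.2)) (D.getD q (0, 0, PySem.Dict.empty)) := by
  induction L with
  | nil => intro D q; rfl
  | cons s L ih =>
    intro D q
    by_cases hq : s.1 = q
    · simp only [List.foldl_cons, List.filter_cons, hq, beq_self_eq_true, if_pos, List.map_cons]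
      rw [ih]
      simp [perPid, PySem.Dict.getD_insert, hq]
    · have hne : (s.1 == q) = false := by simp [hq]
      simp only [List.foldl_cons, List.filter_cons, hne]
      rw [ih]
      simp [PySem.Dict.getD_insert, Ne.symm hq]

-- getD is the default through a fold inserting exactly that default
theorem getD_foldl_insert_const {ν : Type} (v : ν) (l : List Int) :
    ∀ (d : PySem.Dict Int ν) (q : Int), d.getD q v = v →
    (l.foldl (fun d i => d.insert i v) d).getD q v = v := by
  induction l with
  | nil => intro d q h; exact h
  | cons i l ih =>
    intro d q h
    simp only [List.foldl_cons]
    exact ih _ q (by rw [PySem.Dict.getD_insert]; split <;> simp [h])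

theorem grp_ne (L : List (Int × Int × Int)) (x : Int × Int × Int) (m : Int) (hm : m ≠ x.1) :
    grp (L ++ [x]) m = grp L m := by
  have hb : (x.1 == m) = false := beq_eq_false_iff_ne.mpr (Ne.symm hm)
  simp [grp, List.filter_append, hb]

theorem grp_self (L : List (Int × Int × Int)) (x : Int × Int × Int) :
    grp (L ++ [x]) x.1 = grp L x.1 ++ [x.2] := by
  simp [grp, List.filter_append]

theorem grp_nil_of_not_mem {L : List (Int × Int × Int)} {m : Int} (h : m ∉ L.map (·.1)) :
    grp L m = [] := by
  have : L.filter (fun y => y.1 == m) = [] := by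
    rw [List.filter_eq_nil_iff]
    intro y hy
    simp only [beq_iff_eq, decide_eq_true_eq]
    intro hEq
    exact h (List.mem_map.mpr ⟨y, hy, hEq⟩)
  simp [grp, this]

theorem pairP_append_singleton (g : List (Int × Int)) (e : Int × Int) :
    pairP (g ++ [e]) = pairStep (pairP g) e := by
  simp [pairP, List.foldl_append]

theorem mem_map_fst_append (L : List (Int × Int × Int)) (x : Int × Int × Int) (m : Int) :
    m ∈ (L ++ [x]).map (·.1) ↔ m ∈ L.map (·.1) ∨ m = x.1 := by
  simp

-- the master invariant for one participant's fold of pcInner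
theorem perPid_inv (L : List (Int × Int × Int)) :
    (perPid L (0, 0, PySem.Dict.empty)).1 = cnt L ∧
    (perPid L (0, 0, PySem.Dict.empty)).2.1 = sc L ∧
    ∀ m : Int, (perPid L (0, 0, PySem.Dict.empty)).2.2.get? m =
      if m ∈ L.map (·.1) then some (pairP (grp L m)) else none := by
  induction L using List.reverseRecOn with
  | nil =>
    refine ⟨rfl, rfl, ?_⟩
    intro m
    simp [perPid, PySem.Dict.get?_empty, cnt, sc]
  | append_singleton L x ih =>
    obtain ⟨ih1, ih2, ih3⟩ := ih
    have hstep : perPid (L ++ [x]) (0, 0, PySem.Dict.empty)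
        = pcInner (perPid L (0, 0, PySem.Dict.empty)) x.1 x.2.1 x.2.2 := by
      simp [perPid, List.foldl_append]
    set p := perPid L (0, 0, PySem.Dict.empty) with hpdef
    have hcont : p.2.2.contains x.1 = decide (x.1 ∈ L.map (·.1)) := by
      rw [PySem.Dict.contains_eq_isSome_get?, ih3 x.1]
      by_cases hmem : x.1 ∈ L.map (·.1) <;> simp [hmem]
    by_cases hmem : x.1 ∈ L.map (·.1)
    · -- the problem already has an entry for this participant
      have hprobs : (if p.2.2.contains x.1 then p.2.2 else p.2.2.insert x.1 (0, none)) = p.2.2 := by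
        rw [hcont]; simp [hmem]
      have hpd : p.2.2.getD x.1 (0, none) = pairP (grp L x.1) :=
        PySem.Dict.getD_of_get?_eq_some _ _ (by rw [ih3 x.1]; simp [hmem])
      set ws := pairP (grp L x.1) with hws
      have hnew : pairP (grp (L ++ [x]) x.1) = pairStep ws x.2 := by
        rw [grp_self, pairP_append_singleton]
      have hoffI : ∀ y ∈ PySem.Set.ofList (L.map (·.1)), y ≠ x.1 →
          (fun m => indOf (pairP (grp L m))) y = (fun m => indOf (pairP (grp (L ++ [x]) m))) y := by
        intro y _ hy; simp only; rw [grp_ne L x y hy]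
      have hoffS : ∀ y ∈ PySem.Set.ofList (L.map (·.1)), y ≠ x.1 →
          (fun m => scOf (pairP (grp L m))) y = (fun m => scOf (pairP (grp (L ++ [x]) m))) y := by
        intro y _ hy; simp only; rw [grp_ne L x y hy]
      have hcnt : cnt (L ++ [x]) = cnt L + (indOf (pairStep ws x.2) - indOf ws) := by
        unfold cnt
        simp only [List.map_append, List.map_cons, List.map_nil]
        rw [set_ofList_append_singleton_mem hmem,
          sum_map_congr_single (fun m => indOf (pairP (grp L m)))
            (fun m => indOf (pairP (grp (L ++ [x]) m)))
            (PySem.Set.nodup_ofList _) ((PySem.Set.mem_ofList _ _).mpr hmem) hoffI]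
        rw [hnew]
      have hsc : sc (L ++ [x]) = sc L + (scOf (pairStep ws x.2) - scOf ws) := by
        unfold sc
        simp only [List.map_append, List.map_cons, List.map_nil]
        rw [set_ofList_append_singleton_mem hmem,
          sum_map_congr_single (fun m => scOf (pairP (grp L m)))
            (fun m => scOf (pairP (grp (L ++ [x]) m)))
            (PySem.Set.nodup_ofList _) ((PySem.Set.mem_ofList _ _).mpr hmem) hoffS]
        rw [hnew]
      have hpc : pcInner p x.1 x.2.1 x.2.2 =
          (if x.2.2 = 1 ∧ ws.2 = none then
            (p.1 + 1, p.2.1 + (x.2.1 + ws.1 * 20), p.2.2.insert x.1 (ws.1, some x.2.1))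
          else if x.2.2 = 0 ∧ ws.2 = none then
            (p.1, p.2.1, p.2.2.insert x.1 (ws.1 + 1, ws.2))
          else (p.1, p.2.1, p.2.2)) := by
        simp only [pcInner]
        rw [hprobs, hpd]
      rw [hstep, hpc]
      by_cases hA : x.2.2 = 1 ∧ ws.2 = none
      · rw [if_pos hA]
        have hps : pairStep ws x.2 = (ws.1, some x.2.1) := by
          simp [pairStep, hA.1, hA.2]
        refine ⟨?_, ?_, ?_⟩
        · show p.1 + 1 = cnt (L ++ [x])
          rw [hcnt, ih1, hps]
          simp [indOf, hA.2]
        · show p.2.1 + (x.2.1 + ws.1 * 20) = sc (L ++ [x])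
          rw [hsc, ih2, hps]
          simp [scOf, hA.2]
        · intro m
          rw [PySem.Dict.get?_insert]
          by_cases hmx : m = x.1
          · subst hmx
            rw [if_pos rfl, if_pos ((mem_map_fst_append L x x.1).mpr (Or.inr rfl)), hnew, hps]
          · rw [if_neg hmx, ih3 m, grp_ne L x m hmx]
            have : (m ∈ (L ++ [x]).map (·.1)) ↔ (m ∈ L.map (·.1)) := by
              rw [mem_map_fst_append]; simp [hmx]
            by_cases hm2 : m ∈ L.map (·.1) <;> simp [hm2, this, hmx]
      · by_cases hB : x.2.2 = 0 ∧ ws.2 = none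
        · rw [if_neg hA, if_pos hB]
          have hps : pairStep ws x.2 = (ws.1 + 1, ws.2) := by
            have hx1 : ¬(x.2.2 = 1 ∧ ws.2 = none) := hA
            simp only [pairStep]
            rw [if_neg hx1, if_pos hB]
          refine ⟨?_, ?_, ?_⟩
          · show p.1 = cnt (L ++ [x])
            rw [hcnt, ih1, hps]
            simp [indOf]
          · show p.2.1 = sc (L ++ [x])
            rw [hsc, ih2, hps]
            simp [scOf, hB.2]
          · intro m
            rw [PySem.Dict.get?_insert]
            by_cases hmx : m = x.1
            · subst hmx
              rw [if_pos rfl, if_pos ((mem_map_fst_append L x x.1).mpr (Or.inr rfl)), hnew, hps]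
            · rw [if_neg hmx, ih3 m, grp_ne L x m hmx]
              have : (m ∈ (L ++ [x]).map (·.1)) ↔ (m ∈ L.map (·.1)) := by
                rw [mem_map_fst_append]; simp [hmx]
              by_cases hm2 : m ∈ L.map (·.1) <;> simp [hm2, this, hmx]
        · rw [if_neg hA, if_neg hB]
          have hps : pairStep ws x.2 = ws := by
            simp only [pairStep]
            rw [if_neg hA, if_neg hB]
          refine ⟨?_, ?_, ?_⟩
          · show p.1 = cnt (L ++ [x])
            rw [hcnt, ih1, hps]; ring
          · show p.2.1 = sc (L ++ [x])
            rw [hsc, ih2, hps]; ring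
          · intro m
            by_cases hmx : m = x.1
            · subst hmx
              rw [ih3 x.1, if_pos hmem, if_pos ((mem_map_fst_append L x x.1).mpr (Or.inl hmem)), hnew, hps]
            · rw [ih3 m, grp_ne L x m hmx]
              have : (m ∈ (L ++ [x]).map (·.1)) ↔ (m ∈ L.map (·.1)) := by
                rw [mem_map_fst_append]; simp [hmx]
              by_cases hm2 : m ∈ L.map (·.1) <;> simp [hm2, this, hmx]
    · -- first submission of this participant for this problem id
      have hgrpnil : grp L x.1 = [] := grp_nil_of_not_mem hmem
      have hnew : pairP (grp (L ++ [x]) x.1) = pairStep (0, none) x.2 := by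
        rw [grp_self, hgrpnil]
        simp [pairP]
      have hprobs : (if p.2.2.contains x.1 then p.2.2 else p.2.2.insert x.1 (0, none))
          = p.2.2.insert x.1 (0, none) := by
        rw [hcont]; simp [hmem]
      have hpd : (p.2.2.insert x.1 ((0 : Int), (none : Option Int))).getD x.1 (0, none) = ((0 : Int), (none : Option Int)) := by
        rw [PySem.Dict.getD_insert]; simp
      have hcnt : cnt (L ++ [x]) = cnt L + indOf (pairStep (0, none) x.2) := by
        unfold cnt
        simp only [List.map_append, List.map_cons, List.map_nil]
        rw [set_ofList_append_singleton_not_mem hmem]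
        simp only [List.map_append, List.map_cons, List.map_nil, List.sum_append]
        have h1 : (PySem.Set.ofList (L.map (·.1))).map (fun m => indOf (pairP (grp (L ++ [x]) m)))
            = (PySem.Set.ofList (L.map (·.1))).map (fun m => indOf (pairP (grp L m))) := by
          apply List.map_congr_left
          intro y hy
          have hyL : y ∈ L.map (·.1) := (PySem.Set.mem_ofList _ _).mp hy
          have : y ≠ x.1 := fun hEq => hmem (hEq ▸ hyL)
          rw [grp_ne L x y this]
        rw [h1, hnew]
        simp
      have hsc : sc (L ++ [x]) = sc L + scOf (pairStep (0, none) x.2) := by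
        unfold sc
        simp only [List.map_append, List.map_cons, List.map_nil]
        rw [set_ofList_append_singleton_not_mem hmem]
        simp only [List.map_append, List.map_cons, List.map_nil, List.sum_append]
        have h1 : (PySem.Set.ofList (L.map (·.1))).map (fun m => scOf (pairP (grp (L ++ [x]) m)))
            = (PySem.Set.ofList (L.map (·.1))).map (fun m => scOf (pairP (grp L m))) := by
          apply List.map_congr_left
          intro y hy
          have hyL : y ∈ L.map (·.1) := (PySem.Set.mem_ofList _ _).mp hy
          have : y ≠ x.1 := fun hEq => hmem (hEq ▸ hyL)
          rw [grp_ne L x y this]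
        rw [h1, hnew]
        simp
      have hpc : pcInner p x.1 x.2.1 x.2.2 =
          (if x.2.2 = 1 then
            (p.1 + 1, p.2.1 + (x.2.1 + 0 * 20), p.2.2.insert x.1 (0, some x.2.1))
          else if x.2.2 = 0 then
            (p.1, p.2.1, p.2.2.insert x.1 (0 + 1, none))
          else (p.1, p.2.1, p.2.2.insert x.1 (0, none))) := by
        simp only [pcInner]
        rw [hprobs, hpd]
        simp [PySem.Dict.insert_insert_self]
      rw [hstep, hpc]
      by_cases h1 : x.2.2 = 1
      · rw [if_pos h1]
        have hps : pairStep ((0 : Int), (none : Option Int)) x.2 = (0, some x.2.1) := by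
          simp [pairStep, h1]
        refine ⟨?_, ?_, ?_⟩
        · show p.1 + 1 = cnt (L ++ [x])
          rw [hcnt, ih1, hps]
          simp [indOf]
        · show p.2.1 + (x.2.1 + 0 * 20) = sc (L ++ [x])
          rw [hsc, ih2, hps]
          simp [scOf]
        · intro m
          rw [PySem.Dict.get?_insert]
          by_cases hmx : m = x.1
          · subst hmx
            rw [if_pos rfl, if_pos ((mem_map_fst_append L x x.1).mpr (Or.inr rfl)), hnew, hps]
          · rw [if_neg hmx, ih3 m, grp_ne L x m hmx]
            have : (m ∈ (L ++ [x]).map (·.1)) ↔ (m ∈ L.map (·.1)) := by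
              rw [mem_map_fst_append]; simp [hmx]
            by_cases hm2 : m ∈ L.map (·.1) <;> simp [hm2, this, hmx]
      · by_cases h0 : x.2.2 = 0
        · rw [if_neg h1, if_pos h0]
          have hps : pairStep ((0 : Int), (none : Option Int)) x.2 = (0 + 1, none) := by
            simp [pairStep, h1, h0]
          refine ⟨?_, ?_, ?_⟩
          · show p.1 = cnt (L ++ [x])
            rw [hcnt, ih1, hps]
            simp [indOf]
          · show p.2.1 = sc (L ++ [x])
            rw [hsc, ih2, hps]
            simp [scOf]
          · intro m
            rw [PySem.Dict.get?_insert]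
            by_cases hmx : m = x.1
            · subst hmx
              rw [if_pos rfl, if_pos ((mem_map_fst_append L x x.1).mpr (Or.inr rfl)), hnew, hps]
            · rw [if_neg hmx, ih3 m, grp_ne L x m hmx]
              have : (m ∈ (L ++ [x]).map (·.1)) ↔ (m ∈ L.map (·.1)) := by
                rw [mem_map_fst_append]; simp [hmx]
              by_cases hm2 : m ∈ L.map (·.1) <;> simp [hm2, this, hmx]
        · rw [if_neg h1, if_neg h0]
          have hps : pairStep ((0 : Int), (none : Option Int)) x.2 = (0, none) := by
            simp [pairStep, h1, h0]
          refine ⟨?_, ?_, ?_⟩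
          · show p.1 = cnt (L ++ [x])
            rw [hcnt, ih1, hps]
            simp [indOf]
          · show p.2.1 = sc (L ++ [x])
            rw [hsc, ih2, hps]
            simp [scOf]
          · intro m
            rw [PySem.Dict.get?_insert]
            by_cases hmx : m = x.1
            · subst hmx
              rw [if_pos rfl, if_pos ((mem_map_fst_append L x x.1).mpr (Or.inr rfl)), hnew, hps]
            · rw [if_neg hmx, ih3 m, grp_ne L x m hmx]
              have : (m ∈ (L ++ [x]).map (·.1)) ↔ (m ∈ L.map (·.1)) := by
                rw [mem_map_fst_append]; simp [hmx]
              by_cases hm2 : m ∈ L.map (·.1) <;> simp [hm2, this, hmx]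

-- B's _contrib computes the score of the pair machine
theorem bContrib_spec (g : List (Int × Int)) : ∀ seen : List (Int × Int),
    bContrib seen g =
      (g.foldl pairStep (((seen.filter (fun y => y.2 = 0)).length : Int), none)).2.map
        (fun t => t + 20 * (g.foldl pairStep (((seen.filter (fun y => y.2 = 0)).length : Int), none)).1) := by
  induction g with
  | nil => intro seen; rfl
  | cons x rest ih =>
    intro seen
    by_cases h1 : x.2 = 1
    · have hstuck := pairP_stuck rest ((seen.filter (fun y => y.2 = 0)).length : Int) x.1
      simp [bContrib, h1, List.foldl_cons, pairStep, hstuck]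
    · by_cases h0 : x.2 = 0
      · have hIH := ih (seen ++ [x])
        have hlen : ((seen ++ [x]).filter (fun y => y.2 = 0)).length
            = (seen.filter (fun y => y.2 = 0)).length + 1 := by
          simp [List.filter_append, h0]
        rw [hlen] at hIH
        simp only [bContrib, h1, List.foldl_cons]
        rw [hIH]
        have hps : pairStep (((seen.filter (fun y => y.2 = 0)).length : Int), none) x
            = ((((seen.filter (fun y => y.2 = 0)).length : Int) + 1), none) := by
          simp [pairStep, h1, h0]
        rw [hps]
        push_cast
        rfl
      · have hIH := ih (seen ++ [x])
        have hlen : ((seen ++ [x]).filter (fun y => y.2 = 0)).length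
            = (seen.filter (fun y => y.2 = 0)).length := by
          simp [List.filter_append, h0]
        rw [hlen] at hIH
        simp only [bContrib, h1, List.foldl_cons]
        rw [hIH]
        have hps : pairStep (((seen.filter (fun y => y.2 = 0)).length : Int), none) x
            = (((seen.filter (fun y => y.2 = 0)).length : Int), none) := by
          simp [pairStep, h1, h0]
        rw [hps]
        simp

theorem bContrib_pairP (g : List (Int × Int)) :
    bContrib [] g = (pairP g).2.map (fun t => t + 20 * (pairP g).1) := by
  have := bContrib_spec g []
  simpa [pairP] using this

theorem foldl_stats (gs : List (List (Int × Int))) : ∀ c0 s0 : Int,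
    gs.foldl (fun cs g => match bContrib [] g with
        | some c => (cs.1 + 1, cs.2 + c)
        | none => cs) (c0, s0)
      = (c0 + (gs.map (fun g => indOf (pairP g))).sum,
         s0 + (gs.map (fun g => scOf (pairP g))).sum) := by
  induction gs with
  | nil => intro c0 s0; simp
  | cons g gs ih =>
    intro c0 s0
    rw [List.foldl_cons, bContrib_pairP g]
    cases hst : (pairP g).2 with
    | none =>
      have h1 : indOf (pairP g) = 0 := by simp [indOf, hst]
      have h2 : scOf (pairP g) = 0 := by simp [scOf, hst]
      simp only [Option.map_none]
      rw [ih]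
      simp [h1, h2]
    | some t =>
      have h1 : indOf (pairP g) = 1 := by simp [indOf, hst]
      have h2 : scOf (pairP g) = t + (pairP g).1 * 20 := by simp [scOf, hst]
      simp only [Option.map_some]
      rw [ih]
      simp only [List.map_cons, List.sum_cons, h1, h2, Prod.mk.injEq]
      constructor <;> ring

theorem bStats_eq (subs : List (Int × Int × Int)) : bStats subs = (cnt subs, sc subs) := by
  simp only [bStats]
  have hkeys : (subs.foldl (fun g x => g.modify x.1 [] (· ++ [x.2])) PySem.Dict.empty).keys
      = PySem.Set.ofList (subs.map (·.1)) := by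
    rw [PySem.Dict.keys_foldl_modify_key subs (·.1) [] (fun _ x => (· ++ [x.2])) PySem.Dict.empty]
    rw [PySem.Dict.keys_empty, PySem.Set.ofList_eq_foldl]
    rfl
  have hnd : (subs.foldl (fun g x => g.modify x.1 [] (· ++ [x.2])) PySem.Dict.empty).keys.Nodup := by
    rw [hkeys]; exact PySem.Set.nodup_ofList _
  have hgetD : ∀ m, (subs.foldl (fun g x => g.modify x.1 [] (· ++ [x.2])) PySem.Dict.empty).getD m []
      = grp subs m := by
    intro m
    rw [PySem.Dict.getD_foldl_modify_append subs PySem.Dict.empty m]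
    simp [grp, PySem.Dict.getD_empty]
  rw [PySem.Dict.values_eq_map_keys _ hnd []]
  rw [hkeys]
  have hmap : (PySem.Set.ofList (subs.map (·.1))).map
        (fun k => (subs.foldl (fun g x => g.modify x.1 [] (· ++ [x.2])) PySem.Dict.empty).getD k [])
      = (PySem.Set.ofList (subs.map (·.1))).map (fun k => grp subs k) := by
    apply List.map_congr_left; intro k _; exact hgetD k
  rw [hmap, foldl_stats]
  simp [cnt, sc, List.map_map, Function.comp_def]

-- ===== VERDICT (by name: the statement is the Claim_ definition above) =====
theorem process_contest_spec : Claim_equal_process_contest := by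
  intro M N P subs _hDom hPre
  show process_contest M N P subs = process_contest_alt M N P subs
  simp only [process_contest, process_contest_alt]
  have hmemrange : ∀ y ∈ subs.map (fun s => s.1), y ∈ PySem.List.pyRange 1 (P + 1) 1 := by
    intro y hy
    obtain ⟨s, hs, rfl⟩ := List.mem_map.mp hy
    have := hPre s hs
    rw [PySem.List.mem_pyRange_one]
    omega
  have hupd : PySem.Set.update ([] : List Int) (PySem.List.pyRange 1 (P + 1) 1)
      = PySem.Set.ofList (PySem.List.pyRange 1 (P + 1) 1) := by
    rw [PySem.Set.ofList_eq_foldl]; rfl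
  have hkeys0 : ((PySem.List.pyRange 1 (P + 1) 1).foldl
      (fun d i => d.insert i ((0 : Int), (0 : Int),
        (PySem.Dict.empty : PySem.Dict Int (Int × Option Int)))) PySem.Dict.empty).keys
      = PySem.List.pyRange 1 (P + 1) 1 := by
    rw [PySem.Dict.keys_foldl_insert, PySem.Dict.keys_empty, hupd]
    exact set_ofList_nodup _ (PySem.List.nodup_pyRange_one 1 (P + 1))
  have hkeysA : (subs.foldl
      (fun d s => d.insert s.1 (pcInner (d.getD s.1 (0, 0, PySem.Dict.empty)) s.2.1 s.2.2.1 s.2.2.2))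
      ((PySem.List.pyRange 1 (P + 1) 1).foldl
        (fun d i => d.insert i ((0 : Int), (0 : Int),
          (PySem.Dict.empty : PySem.Dict Int (Int × Option Int)))) PySem.Dict.empty)).keys
      = PySem.List.pyRange 1 (P + 1) 1 := by
    rw [PySem.Dict.keys_foldl_insert_key, hkeys0]
    exact set_update_subset _ _ hmemrange
  have hndA : (subs.foldl
      (fun d s => d.insert s.1 (pcInner (d.getD s.1 (0, 0, PySem.Dict.empty)) s.2.1 s.2.2.1 s.2.2.2))
      ((PySem.List.pyRange 1 (P + 1) 1).foldl
        (fun d i => d.insert i ((0 : Int), (0 : Int),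
          (PySem.Dict.empty : PySem.Dict Int (Int × Option Int)))) PySem.Dict.empty)).keys.Nodup := by
    rw [hkeysA]; exact PySem.List.nodup_pyRange_one 1 (P + 1)
  rw [PySem.Dict.items_eq_map_keys _ hndA ((0 : Int), (0 : Int), PySem.Dict.empty), hkeysA,
    List.map_map]
  -- pointwise agreement over the pid range
  congr 1
  apply List.map_congr_left
  intro pid _
  have hA0 : (((PySem.List.pyRange 1 (P + 1) 1).foldl
      (fun d i => d.insert i ((0 : Int), (0 : Int),
        (PySem.Dict.empty : PySem.Dict Int (Int × Option Int)))) PySem.Dict.empty)).getD pid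
      (0, 0, PySem.Dict.empty) = (0, 0, PySem.Dict.empty) :=
    getD_foldl_insert_const _ _ _ pid (PySem.Dict.getD_empty _ _)
  have hApt : (subs.foldl
      (fun d s => d.insert s.1 (pcInner (d.getD s.1 (0, 0, PySem.Dict.empty)) s.2.1 s.2.2.1 s.2.2.2))
      ((PySem.List.pyRange 1 (P + 1) 1).foldl
        (fun d i => d.insert i ((0 : Int), (0 : Int),
          (PySem.Dict.empty : PySem.Dict Int (Int × Option Int)))) PySem.Dict.empty)).getD pid
      (0, 0, PySem.Dict.empty)
      = perPid ((subs.filter (fun s => s.1 == pid)).map (·.2)) (0, 0, PySem.Dict.empty) := by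
    rw [a_fold_pointwise subs _ pid, hA0]
  have hB0 : (((PySem.List.pyRange 1 (P + 1) 1).foldl
      (fun d i => d.insert i ([] : List (Int × Int × Int))) PySem.Dict.empty)).getD pid [] = [] :=
    getD_foldl_insert_const _ _ _ pid (PySem.Dict.getD_empty _ _)
  have hBpt : (subs.foldl (fun d s => d.modify s.1 [] (· ++ [s.2]))
      ((PySem.List.pyRange 1 (P + 1) 1).foldl
        (fun d i => d.insert i ([] : List (Int × Int × Int))) PySem.Dict.empty)).getD pid []
      = (subs.filter (fun s => s.1 == pid)).map (·.2) := by
    rw [PySem.Dict.getD_foldl_modify_append, hB0, List.nil_append]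
  obtain ⟨h1, h2, -⟩ := perPid_inv ((subs.filter (fun s => s.1 == pid)).map (·.2))
  simp only [Function.comp_apply]
  rw [hApt, hBpt, bStats_eq, h1, h2]
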